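-- pv_equiv track=rewrite | github.com/sizbrother/DatabaseOptimizerSystem | custom_ast.py | consolidate_tokens
-- ===== SOURCE A (Python) =====
-- def consolidate_tokens(tokens):
--     combined_tokens = []
--     i = 0
--     operators = {'AND', 'OR', 'IN'}
--
--     while i < len(tokens):
--         token_upper = tokens[i].upper()
--
--         if token_upper == 'SELECT':
--             while combined_tokens:
--                 if combined_tokens[-1].upper() not in operators:
--                     combined_tokens.pop()
--                 elif combined_tokens[-1].upper() in operators:
--                     combined_tokens.pop()
--                     return combined_tokens
--         else:
--             combined_tokens.append(tokens[i])
--         i += 1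
--
--     return combined_tokens
-- ===== SOURCE B (Python) =====
-- def consolidate_tokens(tokens):
--     operators = {'AND', 'OR', 'IN'}
--     buffer = []
--     last_op = -1  # index in buffer of the most recently appended operator
--     for tok in tokens:
--         up = tok.upper()
--         if up == 'SELECT':
--             if last_op != -1:
--                 return buffer[:last_op]
--             buffer = []
--         else:
--             if up in operators:
--                 last_op = len(buffer)
--             buffer.append(tok)
--     return buffer
-- ===== Notes on version B (the rewrite author's own statement) =====
-- stated objective: alternative
-- what changed: Replaces A's inner stack-popping while-loop on SELECT by a single forward pass that tracks the index of the most recently appended operator and returns a slice of the buffer at that index.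
import Mathlib
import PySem

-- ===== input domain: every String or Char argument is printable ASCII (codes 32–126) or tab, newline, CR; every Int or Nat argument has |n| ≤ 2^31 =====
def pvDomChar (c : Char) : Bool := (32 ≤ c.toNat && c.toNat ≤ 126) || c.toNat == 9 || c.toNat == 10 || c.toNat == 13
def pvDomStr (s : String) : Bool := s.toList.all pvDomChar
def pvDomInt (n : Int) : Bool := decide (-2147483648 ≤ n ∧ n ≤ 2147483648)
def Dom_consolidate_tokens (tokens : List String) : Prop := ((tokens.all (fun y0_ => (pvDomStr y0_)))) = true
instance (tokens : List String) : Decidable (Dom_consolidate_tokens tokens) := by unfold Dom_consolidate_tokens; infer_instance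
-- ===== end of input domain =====

-- B replaces A's inner stack-popping while-loop by tracking, in one forward pass,
-- the index of the most recently appended operator (objective: alternative decomposition).

-- ===== PORT A =====
-- token.upper() ∈ {'AND','OR','IN'}
def pvIsOp (s : String) : Bool := s = "AND" || s = "OR" || s = "IN"

-- A's inner `while combined_tokens:` loop: pop the last element; if it was an
-- operator, return the remaining buffer (some); if the buffer empties, fall
-- through (none).
def pvPopLoopA (buf : List String) : Option (List String) :=
  if h : buf = [] then none
  else if !(pvIsOp (PySem.Str.upper (buf.getLast h))) then pvPopLoopA buf.dropLast
  else some buf.dropLast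
termination_by buf.length
decreasing_by
  have : buf.length ≠ 0 := by simpa [List.length_eq_zero_iff] using h
  simp [List.length_dropLast]; omega

-- A's outer `while i < len(tokens):` loop over the remaining tokens
def pvLoopA : List String → List String → List String
  | buf, [] => buf
  | buf, t :: rest =>
    if PySem.Str.upper t = "SELECT" then
      match pvPopLoopA buf with
      | some res => res
      | none => pvLoopA [] rest
    else pvLoopA (buf ++ [t]) rest

def consolidate_tokens (tokens : List String) : List String := pvLoopA [] tokens

-- ===== PORT B =====
-- B's single forward pass: buffer plus last_op, the index of the most recently
-- appended operator (-1 if the current buffer holds none).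
def pvLoopB : List String → Int → List String → List String
  | buf, _, [] => buf
  | buf, lastOp, t :: rest =>
    let up := PySem.Str.upper t
    if up = "SELECT" then
      if lastOp ≠ -1 then PySem.List.slice buf none (some lastOp)
      else pvLoopB [] (-1) rest
    else
      let lastOp' := if pvIsOp up then (buf.length : Int) else lastOp
      pvLoopB (buf ++ [t]) lastOp' rest

def consolidate_tokens_alt (tokens : List String) : List String := pvLoopB [] (-1) tokens

-- ===== PRECONDITION & SPEC =====
def Spec_consolidate_tokens (tokens : List String) (out : List String) : Prop := out = consolidate_tokens_alt tokens
instance (tokens : List String) (out : List String) : Decidable (Spec_consolidate_tokens tokens out) := by unfold Spec_consolidate_tokens; infer_instance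

-- ===== CLAIM (what is proved, stated in full; the proofs are below) =====
def Claim_equal_consolidate_tokens : Prop := ∀ (tokens : List String), Dom_consolidate_tokens tokens → Spec_consolidate_tokens tokens (consolidate_tokens tokens)

-- ===== LEMMAS AND PROOFS =====

-- Index (from the front) of the last operator in the buffer, -1 if none;
-- computed on the reversed list.
def pvLr : List String → Int
  | [] => -1
  | t :: r => if pvIsOp (PySem.Str.upper t) then (r.length : Int) else pvLr r

def pvL (buf : List String) : Int := pvLr buf.reverse

theorem pvL_concat (buf : List String) (t : String) :
    pvL (buf ++ [t]) = if pvIsOp (PySem.Str.upper t) then (buf.length : Int) else pvL buf := by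
  simp [pvL, pvLr]

theorem pvL_bound (buf : List String) :
    pvL buf = -1 ∨ (0 ≤ pvL buf ∧ pvL buf < buf.length) := by
  induction buf using List.reverseRecOn with
  | nil => left; rfl
  | append_singleton buf t ih =>
    rw [pvL_concat]
    have hlen : (((buf ++ [t]).length : Int)) = (buf.length : Int) + 1 := by simp
    split_ifs with h
    · right; rw [hlen]; omega
    · rcases ih with h1 | h1
      · left; exact h1
      · right; rw [hlen]; omega

theorem pvPopLoopA_concat (buf : List String) (t : String) :
    pvPopLoopA (buf ++ [t]) =
      if pvIsOp (PySem.Str.upper t) then some buf else pvPopLoopA buf := by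
  rw [pvPopLoopA]
  simp
  split_ifs with h h2 <;> simp_all

theorem pvPopLoopA_eq (buf : List String) :
    pvPopLoopA buf = if pvL buf = -1 then none else some (buf.take (pvL buf).toNat) := by
  induction buf using List.reverseRecOn with
  | nil => rw [pvPopLoopA]; simp [pvL]; rfl
  | append_singleton buf t ih =>
    rw [pvPopLoopA_concat, pvL_concat]
    by_cases h : pvIsOp (PySem.Str.upper t) = true
    · have hlen : ((buf.length : Int)) ≠ -1 := by omega
      simp [h, hlen]
    · simp only [h, Bool.false_eq_true, if_false]
      rw [ih]
      rcases pvL_bound buf with h1 | ⟨h1, h2⟩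
      · simp [h1]
      · have hne : pvL buf ≠ -1 := by omega
        have hle : (pvL buf).toNat ≤ buf.length := by omega
        simp [hne, List.take_append_of_le_length hle]

theorem pvLoop_eq (toks : List String) : ∀ buf, pvLoopA buf toks = pvLoopB buf (pvL buf) toks := by
  induction toks with
  | nil => intro buf; rfl
  | cons t rest ih =>
    intro buf
    simp only [pvLoopA, pvLoopB]
    by_cases hs : PySem.Str.upper t = "SELECT"
    · rw [if_pos hs]; rw [if_pos hs]
      rw [pvPopLoopA_eq]
      rcases pvL_bound buf with h1 | ⟨h1, h2⟩
      · simp only [h1, ne_eq, not_true_eq_false, if_false]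
        simpa [pvL, pvLr] using ih []
      · have hne : pvL buf ≠ -1 := by omega
        simp [hne, PySem.List.slice_to buf h1]
    · rw [if_neg hs]; rw [if_neg hs]
      rw [← pvL_concat]
      exact ih (buf ++ [t])

-- ===== VERDICT (by name: the statement is the Claim_ definition above) =====
theorem consolidate_tokens_spec : Claim_equal_consolidate_tokens := by
  intro tokens _
  show consolidate_tokens tokens = consolidate_tokens_alt tokens
  unfold consolidate_tokens consolidate_tokens_alt
  have : pvL ([] : List String) = -1 := rfl
  rw [pvLoop_eq tokens [], this]
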